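-- pv_equiv track=rewrite | github.com/aemotyka/LOTUS-NER | util/fix_dataset.py | build_text_and_token_offsets
-- ===== SOURCE A (Python) =====
-- def build_text_and_token_offsets(tokens):
--     pieces = []
--     offsets: list[tuple[int, int]] = []
--     position = 0
--
--     for index, token in enumerate(tokens):
--         if index > 0:
--             pieces.append(" ")
--             position += 1
--
--         start = position
--         pieces.append(token)
--         position += len(token)
--         offsets.append((start, position))
--
--     return "".join(pieces), offsets
-- ===== SOURCE B (Python) =====
-- def build_text_and_token_offsets(tokens):
--     # Divide and conquer: build (text, offsets) for each half independently,
--     # then merge by concatenating the texts with a space and shifting the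
--     # right half's offsets by len(left_text) + 1.
--     if not tokens:
--         return "", []
--     if len(tokens) == 1:
--         token = tokens[0]
--         return token, [(0, len(token))]
--     mid = len(tokens) // 2
--     ltext, loffs = build_text_and_token_offsets(tokens[:mid])
--     rtext, roffs = build_text_and_token_offsets(tokens[mid:])
--     shift = len(ltext) + 1
--     return ltext + " " + rtext, loffs + [(s + shift, e + shift) for s, e in roffs]
-- ===== Notes on version B (the rewrite author's own statement) =====
-- stated objective: alternative
-- what changed: B is a divide-and-conquer recursion: it builds (text, offsets) for each half of the token list independently and merges by joining the texts with a space and shifting the right half's offsets by len(left_text)+1, replacing A's single left-to-right loop that interleaves piece-appending with a running position counter.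
import Mathlib
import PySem

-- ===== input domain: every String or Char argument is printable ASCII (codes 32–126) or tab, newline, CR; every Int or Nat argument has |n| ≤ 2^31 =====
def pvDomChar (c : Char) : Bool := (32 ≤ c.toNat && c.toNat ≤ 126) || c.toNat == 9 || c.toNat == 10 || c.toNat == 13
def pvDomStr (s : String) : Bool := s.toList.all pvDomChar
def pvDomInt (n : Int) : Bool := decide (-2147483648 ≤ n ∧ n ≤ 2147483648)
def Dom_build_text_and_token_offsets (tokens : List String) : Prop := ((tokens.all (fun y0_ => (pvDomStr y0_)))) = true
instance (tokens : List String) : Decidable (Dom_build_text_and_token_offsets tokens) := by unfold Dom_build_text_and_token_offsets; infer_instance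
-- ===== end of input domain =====

-- B replaces A's single left-to-right loop (interleaved pieces list, running
-- position, index>0 space branch) by a divide-and-conquer recursion that merges
-- the two halves' (text, offsets); objective: alternative. Equal on all inputs.

-- ===== PORT A =====
-- A's loop body (transliterated), used by port A's foldl
def pvStepA (s : List String × List (Int × Int) × Int) (it : Int × String) :
    List String × List (Int × Int) × Int :=
  let pieces := s.1; let offsets := s.2.1; let position := s.2.2
  let index := it.1; let token := it.2
  let pieces := if index > 0 then pieces ++ [" "] else pieces
  let position := if index > 0 then position + 1 else position
  let start := position
  let pieces := pieces ++ [token]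
  let position := position + PySem.Str.len token
  (pieces, offsets ++ [(start, position)], position)

def build_text_and_token_offsets (tokens : List String) : String × (List (Int × Int)) :=
  let st := (PySem.List.enumerate tokens 0).foldl pvStepA ([], [], 0)
  (PySem.Str.join "" st.1, st.2.1)

-- ===== PORT B =====
-- transliteration of Source B: len(tokens)//2 on a nonnegative length is Nat division;
-- tokens[:mid] / tokens[mid:] are PySem.List.slice; '+' on str is String append.
-- 'fuel' is only a structural totality guard: both recursive calls shrink the
-- list, so fuel = tokens.length never runs out and the 0-fuel branch is unreachable.
def pvBuildDC (fuel : Nat) (tokens : List String) : String × (List (Int × Int)) :=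
  match fuel, tokens with
  | _, [] => ("", [])
  | _, [token] => (token, [(0, PySem.Str.len token)])
  | 0, _ :: _ :: _ => ("", [])
  | f + 1, t1 :: t2 :: rest =>
    let toks := t1 :: t2 :: rest
    let mid : Nat := toks.length / 2
    let l := pvBuildDC f (PySem.List.slice toks none (some (mid : Int)))
    let r := pvBuildDC f (PySem.List.slice toks (some (mid : Int)) none)
    let shift := PySem.Str.len l.1 + 1
    (l.1 ++ " " ++ r.1, l.2 ++ r.2.map (fun p => (p.1 + shift, p.2 + shift)))

def build_text_and_token_offsets_alt (tokens : List String) : String × (List (Int × Int)) :=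
  pvBuildDC tokens.length tokens

-- ===== PRECONDITION & SPEC =====
def Spec_build_text_and_token_offsets (tokens : List String) (out : String × (List (Int × Int))) : Prop := out = build_text_and_token_offsets_alt tokens
instance (tokens : List String) (out : String × (List (Int × Int))) : Decidable (Spec_build_text_and_token_offsets tokens out) := by unfold Spec_build_text_and_token_offsets; infer_instance

-- ===== CLAIM (what is proved, stated in full; the proofs are below) =====
def Claim_equal_build_text_and_token_offsets : Prop := ∀ (tokens : List String), Dom_build_text_and_token_offsets tokens → Spec_build_text_and_token_offsets tokens (build_text_and_token_offsets tokens)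

-- ===== LEMMAS AND PROOFS =====

-- the common value: offsets with a running start position q
def pvOffs : List String → Int → List (Int × Int)
  | [], _ => []
  | t :: ts, q => (q, q + PySem.Str.len t) :: pvOffs ts (q + PySem.Str.len t + 1)

-- total width of a token list when space-joined, plus one trailing space
def pvW (ts : List String) : Int := (ts.map (fun t => PySem.Str.len t + 1)).sum

lemma pvOffs_shift (ts : List String) : ∀ (q d : Int),
    pvOffs ts (q + d) = (pvOffs ts q).map (fun p => (p.1 + d, p.2 + d)) := by
  induction ts with
  | nil => intro q d; simp [pvOffs]
  | cons t ts ih =>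
    intro q d
    simp only [pvOffs, List.map_cons]
    refine congrArg₂ _ (by rw [Prod.mk.injEq]; exact ⟨rfl, by ring⟩) ?_
    rw [show q + d + PySem.Str.len t + 1 = (q + PySem.Str.len t + 1) + d by ring, ih]

lemma pvOffs_append (xs ys : List String) : ∀ (q : Int),
    pvOffs (xs ++ ys) q = pvOffs xs q ++ pvOffs ys (q + pvW xs) := by
  induction xs with
  | nil => intro q; simp [pvOffs, pvW]
  | cons x xs ih =>
    intro q
    have hw : pvW (x :: xs) = PySem.Str.len x + 1 + pvW xs := by simp [pvW]
    simp only [List.cons_append, pvOffs, ih, hw]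
    rw [show q + (PySem.Str.len x + 1 + pvW xs) = q + PySem.Str.len x + 1 + pvW xs by ring]

-- space-join of a nonempty list, over List Char
lemma pvJoinS_cons (l : List Char) (ls : List (List Char)) (h : ls ≠ []) :
    PySem.Chars.join [' '] (l :: ls) = l ++ ' ' :: PySem.Chars.join [' '] ls := by
  cases ls with
  | nil => exact absurd rfl h
  | cons l2 ls => rw [PySem.Chars.join_cons_cons]; simp

lemma pvJoinS_append (xs ys : List (List Char)) (hx : xs ≠ []) (hy : ys ≠ []) :
    PySem.Chars.join [' '] (xs ++ ys) =
      PySem.Chars.join [' '] xs ++ ' ' :: PySem.Chars.join [' '] ys := by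
  induction xs with
  | nil => exact absurd rfl hx
  | cons x xs ih =>
    cases xs with
    | nil =>
      simp only [List.nil_append, List.cons_append]
      rw [pvJoinS_cons x ys hy, PySem.Chars.join_singleton]
    | cons x2 xs2 =>
      rw [List.cons_append, pvJoinS_cons x ((x2 :: xs2) ++ ys) (by simp),
          ih (by simp), pvJoinS_cons x (x2 :: xs2) (by simp)]
      simp

lemma pvLen_joinS (ls : List (List Char)) (h : ls ≠ []) :
    ((PySem.Chars.join [' '] ls).length : Int) =
      (ls.map (fun l => (l.length : Int) + 1)).sum - 1 := by
  induction ls with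
  | nil => exact absurd rfl h
  | cons l ls ih =>
    cases ls with
    | nil => simp [PySem.Chars.join_singleton]
    | cons l2 ls2 =>
      rw [pvJoinS_cons l (l2 :: ls2) (by simp)]
      have h2 := ih (by simp)
      simp only [List.length_append, List.length_cons, List.map_cons, List.sum_cons] at *
      push_cast at h2 ⊢
      omega

-- the empty and singleton bases, for any fuel
lemma pvBuildDC_nil (fuel : Nat) : pvBuildDC fuel [] = ("", []) := by
  cases fuel <;> rfl

lemma pvBuildDC_one (fuel : Nat) (t : String) :
    pvBuildDC fuel [t] = (t, [(0, PySem.Str.len t)]) := by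
  cases fuel <;> rfl

-- with enough fuel, pvBuildDC computes (" ".join(tokens), pvOffs tokens 0)
lemma pvBuildDC_eq : ∀ (fuel : Nat) (tokens : List String), tokens.length ≤ fuel →
    pvBuildDC fuel tokens = (PySem.Str.join " " tokens, pvOffs tokens 0) := by
  intro fuel
  induction fuel with
  | zero =>
    intro tokens h
    have : tokens = [] := List.eq_nil_of_length_eq_zero (by omega)
    subst this
    rw [pvBuildDC_nil]
    refine Prod.ext ?_ (by simp [pvOffs])
    show "" = PySem.Str.join " " []
    apply String.ext; rw [PySem.Str.toList_join]; rfl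
  | succ f ih =>
  intro tokens h
  match tokens with
  | [] =>
    rw [pvBuildDC_nil]
    refine Prod.ext ?_ (by simp [pvOffs])
    show "" = PySem.Str.join " " []
    apply String.ext; rw [PySem.Str.toList_join]; rfl
  | [t] =>
    rw [pvBuildDC_one]
    refine Prod.ext ?_ (by simp [pvOffs])
    show t = PySem.Str.join " " [t]
    apply String.ext; rw [PySem.Str.toList_join]
    simp [PySem.Chars.join_singleton]
  | t1 :: t2 :: rest =>
    rw [pvBuildDC]
    simp only [PySem.List.slice_to_natCast, PySem.List.slice_from_natCast]
    set toks := t1 :: t2 :: rest with htoks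
    have hlen : 2 ≤ toks.length := by simp [htoks]
    have hlenf : toks.length ≤ f + 1 := h
    set mid : Nat := toks.length / 2 with hmid
    have hmid1 : 1 ≤ mid := by omega
    have hmidlt : mid < toks.length := by omega
    have htakelen : (toks.take mid).length = mid := by
      simp only [List.length_take]; omega
    have hdroplen : (toks.drop mid).length = toks.length - mid := List.length_drop
    have hL := ih (toks.take mid) (by rw [htakelen]; omega)
    have hR := ih (toks.drop mid) (by rw [hdroplen]; omega)
    rw [hL, hR]
    have htk : toks.take mid ≠ [] := by
      intro h; have := congrArg List.length h; simp at this; omega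
    have hdr : toks.drop mid ≠ [] := by
      intro h; have := congrArg List.length h; simp at this; omega
    have hlenL : PySem.Str.len (PySem.Str.join " " (toks.take mid)) + 1 = pvW (toks.take mid) := by
      have h := pvLen_joinS ((toks.take mid).map String.toList)
        (fun hc => htk (List.map_eq_nil_iff.mp hc))
      have hmm : (((toks.take mid).map String.toList).map (fun l => (l.length : Int) + 1))
          = (toks.take mid).map (fun t => PySem.Str.len t + 1) := by
        rw [List.map_map]; apply List.map_congr_left; intro x _
        simp [PySem.Str.len]
      rw [hmm] at h
      have hj : PySem.Str.len (PySem.Str.join " " (toks.take mid))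
          = ((PySem.Chars.join [' '] ((toks.take mid).map String.toList)).length : Int) := by
        simp [PySem.Str.toList_join]
      rw [hj, h, pvW]
      ring
    refine Prod.ext ?_ ?_
    · -- text component
      show PySem.Str.join " " (toks.take mid) ++ " " ++ PySem.Str.join " " (toks.drop mid)
          = PySem.Str.join " " toks
      apply String.ext
      have hsplit : (PySem.Str.join " " (toks.take mid) ++ " " ++ PySem.Str.join " " (toks.drop mid)).toList
            = (PySem.Str.join " " (toks.take mid)).toList ++ ' ' :: (PySem.Str.join " " (toks.drop mid)).toList := by
        simp
      rw [hsplit, PySem.Str.toList_join, PySem.Str.toList_join, PySem.Str.toList_join]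
      rw [show (" " : String).toList = [' '] from rfl]
      rw [show (toks.map String.toList) = (toks.take mid).map String.toList ++ (toks.drop mid).map String.toList by
            rw [← List.map_append, List.take_append_drop]]
      exact (pvJoinS_append _ _ (fun hc => htk (List.map_eq_nil_iff.mp hc))
        (fun hc => hdr (List.map_eq_nil_iff.mp hc))).symm
    · -- offsets component
      show pvOffs (toks.take mid) 0 ++
          (pvOffs (toks.drop mid) 0).map (fun p =>
            (p.1 + (PySem.Str.len (PySem.Str.join " " (toks.take mid)) + 1),
             p.2 + (PySem.Str.len (PySem.Str.join " " (toks.take mid)) + 1))) = pvOffs toks 0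
      rw [hlenL]
      conv_rhs => rw [show toks = toks.take mid ++ toks.drop mid from (List.take_append_drop _ _).symm]
      rw [pvOffs_append, pvOffs_shift]

lemma pvAlt_eq (tokens : List String) :
    build_text_and_token_offsets_alt tokens = (PySem.Str.join " " tokens, pvOffs tokens 0) :=
  pvBuildDC_eq tokens.length tokens le_rfl

-- A's loop over the tail (all indices ≥ 1): appends " "+token pieces and the
-- offsets pvOffs computes from position+1
lemma pvA_tail (ts : List String) : ∀ (s : Int), 1 ≤ s →
    ∀ (pieces : List String) (offs : List (Int × Int)) (p : Int),
    (PySem.List.enumerate ts s).foldl pvStepA (pieces, offs, p) =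
      ((pieces ++ ts.flatMap (fun t => [" ", t]),
        offs ++ pvOffs ts (p + 1),
        if ts = [] then p else p + (ts.map (fun t => PySem.Str.len t + 1)).sum)) := by
  induction ts with
  | nil => intro s _ pieces offs p; simp [PySem.List.enumerate_nil, pvOffs]
  | cons t ts ih =>
    intro s hs pieces offs p
    rw [PySem.List.enumerate_cons, List.foldl_cons]
    have hstep : pvStepA (pieces, offs, p) (s, t) =
        (pieces ++ [" ", t], offs ++ [(p + 1, p + 1 + PySem.Str.len t)],
          p + 1 + PySem.Str.len t) := by
      simp [pvStepA, if_pos (by omega : s > 0)]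
    rw [hstep, ih (s + 1) (by omega)]
    simp only [pvOffs, List.flatMap_cons, Prod.mk.injEq]
    refine ⟨by simp, by simp, ?_⟩
    split_ifs with h h2 h3 <;> simp_all <;> omega

-- "".join of [t0, " ", t1, " ", t2, …] equals " ".join of [t0, t1, t2, …]
lemma pvJoin_chars (ls : List (List Char)) : ∀ (l0 : List Char),
    PySem.Chars.join [] (l0 :: ls.flatMap (fun l => [[' '], l])) =
      PySem.Chars.join [' '] (l0 :: ls) := by
  induction ls with
  | nil => intro l0; rfl
  | cons l ls ih =>
    intro l0
    simp only [List.flatMap_cons, List.cons_append, List.nil_append]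
    rw [PySem.Chars.join_cons_cons, PySem.Chars.join_cons_cons, ih l,
        PySem.Chars.join_cons_cons]
    simp

lemma pvJoin_str (t0 : String) (ts : List String) :
    PySem.Str.join "" (t0 :: ts.flatMap (fun t => [" ", t])) =
      PySem.Str.join " " (t0 :: ts) := by
  apply String.ext
  rw [PySem.Str.toList_join, PySem.Str.toList_join]
  have hmap : List.map String.toList (ts.flatMap (fun t => [" ", t])) =
      (ts.map String.toList).flatMap (fun l => [[' '], l]) := by
    induction ts with
    | nil => rfl
    | cons t ts ih => simp [ih]
  simp only [List.map_cons, hmap]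
  exact pvJoin_chars (ts.map String.toList) t0.toList

-- ===== VERDICT (by name: the statement is the Claim_ definition above) =====
theorem build_text_and_token_offsets_spec : Claim_equal_build_text_and_token_offsets := by
  intro tokens _
  simp only [Spec_build_text_and_token_offsets, build_text_and_token_offsets, pvAlt_eq]
  cases tokens with
  | nil => simp [PySem.List.enumerate_nil, pvOffs, PySem.Str.join]
  | cons t0 ts =>
    rw [PySem.List.enumerate_cons, List.foldl_cons]
    have h0 : pvStepA ([], [], 0) (0, t0) =
        ([t0], [(0, PySem.Str.len t0)], PySem.Str.len t0) := by
      simp [pvStepA]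
    rw [h0, show (0:Int) + 1 = 1 from rfl, pvA_tail ts 1 le_rfl]
    refine Prod.ext ?_ ?_
    · show PySem.Str.join "" ([t0] ++ ts.flatMap (fun t => [" ", t])) = PySem.Str.join " " (t0 :: ts)
      rw [List.singleton_append]; exact pvJoin_str t0 ts
    · show [(0, PySem.Str.len t0)] ++ pvOffs ts (PySem.Str.len t0 + 1) = pvOffs (t0 :: ts) 0
      simp [pvOffs]
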